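-- pv_equiv track=rewrite | github.com/sankirthk/LeetCode | Profit Target/Main.py | stockPairs
-- ===== SOURCE A (Python) =====
-- def stockPairs(stocksProfit, target):
--     # Set to track seen elements and pairs
--     seen = set()
--     pairs = set()
--
--     for profit in stocksProfit:
--         complement = target - profit
--
--         # If the complement is in seen and not already added to pairs
--         if complement in seen and (profit, complement) not in pairs and (complement, profit) not in pairs:
--             pairs.add((profit, complement))
--         seen.add(profit)
--
--     # The result is the number of unique pairs
--     return len(pairs)
-- ===== SOURCE B (Python) =====
-- def stockPairs(stocksProfit, target):
--     counts = {}
--     for p in stocksProfit: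
--         counts[p] = counts.get(p, 0) + 1
--     total = 0
--     for v in counts:
--         comp = target - v
--         if v == comp:
--             if counts[v] >= 2:
--                 total += 1
--         elif comp in counts and v < comp:
--             total += 1
--     return total
-- ===== Notes on version B (the rewrite author's own statement) =====
-- stated objective: alternative
-- what changed: A's incremental scan maintaining a 'seen' set and a growing 'pairs' set of tuples is replaced by building a value->count table once and then counting, over the distinct values, each unordered pair exactly once at its smaller element (self-pairs gated on count >= 2).
import Mathlib
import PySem

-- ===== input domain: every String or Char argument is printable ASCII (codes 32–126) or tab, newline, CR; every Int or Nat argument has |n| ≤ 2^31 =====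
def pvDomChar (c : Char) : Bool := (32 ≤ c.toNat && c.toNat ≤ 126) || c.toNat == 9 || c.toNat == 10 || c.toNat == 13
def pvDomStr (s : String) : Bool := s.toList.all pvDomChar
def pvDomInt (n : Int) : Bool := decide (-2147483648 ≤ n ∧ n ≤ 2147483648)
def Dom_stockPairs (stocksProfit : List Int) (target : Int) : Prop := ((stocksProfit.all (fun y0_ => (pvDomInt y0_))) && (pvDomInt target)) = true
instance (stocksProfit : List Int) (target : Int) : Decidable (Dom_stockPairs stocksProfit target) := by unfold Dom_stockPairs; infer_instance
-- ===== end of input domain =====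

-- B replaces A's incremental seen/pairs set tracking by a value->count table plus one pass
-- over the distinct values, counting each unordered pair at its smaller element (objective: alternative).

-- ===== PORT A =====
-- loop body of A's single for-loop, acting on the state (seen, pairs)
def stepA (target : Int) (st : PySem.Set Int × PySem.Set (Int × Int)) (profit : Int) :
    PySem.Set Int × PySem.Set (Int × Int) :=
  let complement := target - profit
  let pairs :=
    if PySem.Set.contains st.1 complement
        ∧ ¬ PySem.Set.contains st.2 (profit, complement)
        ∧ ¬ PySem.Set.contains st.2 (complement, profit)
    then PySem.Set.add st.2 (profit, complement) else st.2
  (PySem.Set.add st.1 profit, pairs)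

def stockPairs (stocksProfit : List Int) (target : Int) : Int :=
  let st := stocksProfit.foldl (stepA target) (PySem.Set.empty, PySem.Set.empty)
  PySem.Set.len st.2

-- ===== PORT B =====
def stockPairs_alt (stocksProfit : List Int) (target : Int) : Int :=
  let counts := stocksProfit.foldl
    (fun (d : PySem.Dict Int Int) p => d.insert p (d.getD p 0 + 1)) PySem.Dict.empty
  counts.keys.foldl (fun total v =>
    let comp := target - v
    if v = comp then
      if 2 ≤ counts.getD v 0 then total + 1 else total
    else if counts.contains comp ∧ v < comp then total + 1 else total) 0

-- ===== PRECONDITION & SPEC =====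
def Spec_stockPairs (stocksProfit : List Int) (target : Int) (out : Int) : Prop := out = stockPairs_alt stocksProfit target
instance (stocksProfit : List Int) (target : Int) (out : Int) : Decidable (Spec_stockPairs stocksProfit target out) := by unfold Spec_stockPairs; infer_instance

-- ===== CLAIM (what is proved, stated in full; the proofs are below) =====
def Claim_equal_stockPairs : Prop := ∀ (stocksProfit : List Int) (target : Int), Dom_stockPairs stocksProfit target → Spec_stockPairs stocksProfit target (stockPairs stocksProfit target)

-- ===== LEMMAS AND PROOFS =====

-- the unordered pair {a, b} is counted (both occurrences needed when a = b)
abbrev GoodPair (sp : List Int) (t a b : Int) : Prop :=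
  a + b = t ∧ a ∈ sp ∧ b ∈ sp ∧ (a = b → 2 ≤ sp.count a)

-- B's per-distinct-value predicate: v is the smaller element of a counted pair
abbrev QB (sp : List Int) (t v : Int) : Prop :=
  GoodPair sp t v (t - v) ∧ v ≤ t - v

lemma goodPair_append {sp : List Int} {t a b x : Int}
    (h : GoodPair sp t a b) : GoodPair (sp ++ [x]) t a b := by
  obtain ⟨h1, h2, h3, h4⟩ := h
  refine ⟨h1, by simp [h2], by simp [h3], fun hab => ?_⟩
  have := h4 hab
  simp only [List.count_append]
  omega

-- a pair that becomes good only after appending x is one of three shapes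
lemma new_good_cases {sp : List Int} {t a b x : Int}
    (hg : GoodPair (sp ++ [x]) t a b) (hold : ¬ GoodPair sp t a b) :
    (a = b ∧ a = x ∧ t - x = x ∧ x ∈ sp) ∨
    (a ≠ b ∧ a = x ∧ b = t - x ∧ b ∈ sp ∧ x ∉ sp) ∨
    (a ≠ b ∧ b = x ∧ a = t - x ∧ a ∈ sp ∧ x ∉ sp) := by
  obtain ⟨hab, hap, hbp, hcnt⟩ := hg
  by_cases hab' : a = b
  · subst hab'
    have hax : a = x := by
      by_contra hax
      have hap' : a ∈ sp := by
        rcases List.mem_append.1 hap with h1 | h1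
        · exact h1
        · simp at h1; exact absurd h1 hax
      have hcnt' : 2 ≤ sp.count a := by
        have h2 := hcnt rfl
        rw [List.count_append] at h2
        have h3 : List.count a [x] = 0 := by
          rw [List.count_eq_zero]
          simp [hax]
        omega
      exact hold ⟨hab, hap', hap', fun _ => hcnt'⟩
    subst hax
    have hxp : a ∈ sp := by
      have h2 := hcnt rfl
      rw [List.count_append] at h2
      have h3 : List.count a [a] = 1 := by simp
      exact List.count_pos_iff.1 (by omega)
    exact Or.inl ⟨rfl, rfl, by omega, hxp⟩
  · by_cases hapold : a ∈ sp
    · by_cases hbpold : b ∈ sp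
      · exact absurd ⟨hab, hapold, hbpold, fun h => absurd h hab'⟩ hold
      · have hbx : b = x := by
          rcases List.mem_append.1 hbp with h1 | h1
          · exact absurd h1 hbpold
          · simpa using h1
        subst hbx
        exact Or.inr (Or.inr ⟨hab', rfl, by omega, hapold, hbpold⟩)
    · have hax : a = x := by
        rcases List.mem_append.1 hap with h1 | h1
        · exact absurd h1 hapold
        · simpa using h1
      subst hax
      have hbp' : b ∈ sp := by
        rcases List.mem_append.1 hbp with h1 | h1
        · exact h1
        · simp at h1; exact absurd h1.symm hab'
      exact Or.inr (Or.inl ⟨hab', rfl, by omega, hbp', hapold⟩)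

-- A's loop invariant
def InvA (t : Int) (p : List Int) (st : PySem.Set Int × PySem.Set (Int × Int)) : Prop :=
  (∀ a, a ∈ st.1 ↔ a ∈ p) ∧ st.2.Nodup ∧
  (∀ a b, (a, b) ∈ st.2 → GoodPair p t a b) ∧
  (∀ a b, a ≠ b → (a, b) ∈ st.2 → (b, a) ∉ st.2) ∧
  (∀ a b, GoodPair p t a b → (a, b) ∈ st.2 ∨ (b, a) ∈ st.2)

lemma inv_step {t : Int} {p : List Int} {st : PySem.Set Int × PySem.Set (Int × Int)} (x : Int)
    (h : InvA t p st) : InvA t (p ++ [x]) (stepA t st x) := by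
  obtain ⟨hseen, hnd, hgood, hone, hcomp⟩ := h
  obtain ⟨seen, pairs⟩ := st
  simp only at hseen hnd hgood hone hcomp
  unfold stepA
  simp only
  by_cases hc : PySem.Set.contains seen (t - x) = true
      ∧ ¬ PySem.Set.contains pairs (x, t - x) = true
      ∧ ¬ PySem.Set.contains pairs (t - x, x) = true
  · obtain ⟨hc1, hc2, hc3⟩ := hc
    rw [PySem.Set.contains_iff] at hc1
    rw [PySem.Set.contains_iff] at hc2 hc3
    rw [if_pos ⟨by rwa [PySem.Set.contains_iff], by rwa [PySem.Set.contains_iff],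
        by rwa [PySem.Set.contains_iff]⟩]
    have hadd : PySem.Set.add pairs (x, t - x) = pairs ++ [(x, t - x)] := by
      unfold PySem.Set.add
      rw [if_neg (by simpa [PySem.Set.contains_iff] using hc2)]
    rw [hadd]
    have hxp : t - x ∈ p := (hseen _).1 hc1
    refine ⟨?_, ?_, ?_, ?_, ?_⟩
    · intro a
      rw [PySem.Set.mem_add]
      simp [hseen a]
    · rw [List.nodup_append]
      refine ⟨hnd, List.nodup_singleton _, fun ab h1 b hb => ?_⟩
      simp only [List.mem_singleton] at hb
      subst hb
      intro h
      exact hc2 (h ▸ h1)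
    · intro a b hab
      rcases List.mem_append.1 hab with hin | hnew
      · exact goodPair_append (hgood a b hin)
      · simp only [List.mem_singleton, Prod.mk.injEq] at hnew
        have hgx : GoodPair (p ++ [x]) t x (t - x) := by
          refine ⟨by ring, by simp, by simp [hxp], fun hxx => ?_⟩
          have hxmem : x ∈ p := by rwa [← hxx] at hxp
          have h1 : 1 ≤ p.count x := List.count_pos_iff.2 hxmem
          rw [List.count_append]
          have h3 : List.count x [x] = 1 := by simp
          omega
        rw [hnew.1, hnew.2]
        exact hgx
    · intro a b hab hin hbain
      rcases List.mem_append.1 hin with hin' | hnew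
      · rcases List.mem_append.1 hbain with hba | hban
        · exact hone a b hab hin' hba
        · simp only [List.mem_singleton, Prod.mk.injEq] at hban
          rw [hban.1, hban.2] at hin'
          exact hc3 hin'
      · simp only [List.mem_singleton, Prod.mk.injEq] at hnew
        rcases List.mem_append.1 hbain with hba | hban
        · rw [hnew.1, hnew.2] at hba
          exact hc3 hba
        · simp only [List.mem_singleton, Prod.mk.injEq] at hban
          exact hab (hnew.1.trans hban.1.symm)
    · intro a b hg
      by_cases hold : GoodPair p t a b
      · rcases hcomp a b hold with h1 | h1
        · exact Or.inl (List.mem_append.2 (Or.inl h1))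
        · exact Or.inr (List.mem_append.2 (Or.inl h1))
      · rcases new_good_cases hg hold with ⟨rfl, rfl, htx, _⟩ | ⟨_, rfl, rfl, _, _⟩ | ⟨_, rfl, rfl, _, _⟩
        · exact Or.inl (List.mem_append.2 (Or.inr (by simp [htx])))
        · exact Or.inl (List.mem_append.2 (Or.inr (by simp)))
        · exact Or.inr (List.mem_append.2 (Or.inr (by simp)))
  · rw [if_neg hc]
    refine ⟨?_, hnd, ?_, hone, ?_⟩
    · intro a
      rw [PySem.Set.mem_add]
      simp [hseen a]
    · intro a b hab
      exact goodPair_append (hgood a b hab)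
    · intro a b hg
      by_cases hold : GoodPair p t a b
      · exact hcomp a b hold
      · exfalso
        apply hc
        rcases new_good_cases hg hold with ⟨rfl, rfl, htx, hxin⟩ | ⟨_, rfl, rfl, hbin, hxout⟩ |
            ⟨_, rfl, rfl, hain, hxout⟩
        · refine ⟨by rw [PySem.Set.contains_iff, hseen, htx]; exact hxin, ?_, ?_⟩
          · rw [PySem.Set.contains_iff, htx]
            intro hmem
            exact hold (by simpa [htx] using hgood a a hmem)
          · rw [PySem.Set.contains_iff, htx]
            intro hmem
            exact hold (by simpa [htx] using hgood a a hmem)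
        · refine ⟨by rw [PySem.Set.contains_iff, hseen]; exact hbin, ?_, ?_⟩
          · rw [PySem.Set.contains_iff]
            intro hmem
            exact hxout (hgood _ _ hmem).2.1
          · rw [PySem.Set.contains_iff]
            intro hmem
            exact hxout (hgood _ _ hmem).2.2.1
        · refine ⟨by rw [PySem.Set.contains_iff, hseen]; exact hain, ?_, ?_⟩
          · rw [PySem.Set.contains_iff]
            intro hmem
            exact hxout (hgood _ _ hmem).2.1
          · rw [PySem.Set.contains_iff]
            intro hmem
            exact hxout (hgood _ _ hmem).2.2.1

lemma inv_fold (t : Int) (sp : List Int) :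
    InvA t sp (sp.foldl (stepA t) (PySem.Set.empty, PySem.Set.empty)) := by
  induction sp using List.reverseRecOn with
  | nil =>
    refine ⟨?_, ?_, ?_, ?_, ?_⟩ <;> simp [PySem.Set.empty, GoodPair]
  | append_singleton p x ih =>
    rw [List.foldl_append, List.foldl_cons, List.foldl_nil]
    exact inv_step x ih

-- counting: the pairs set, mapped to the smaller element, is exactly the set B counts
lemma pairs_length (t : Int) (sp : List Int) {st : PySem.Set Int × PySem.Set (Int × Int)}
    (h : InvA t sp st) :
    st.2.length = (PySem.Set.ofList sp).countP (fun v => decide (QB sp t v)) := by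
  obtain ⟨hseen, hnd, hgood, hone, hcomp⟩ := h
  have hinj : ∀ p1 ∈ st.2, ∀ p2 ∈ st.2,
      min p1.1 p1.2 = min p2.1 p2.2 → p1 = p2 := by
    rintro ⟨a, b⟩ h1 ⟨c, d⟩ h2 hmin
    have hab : a + b = t := (hgood a b h1).1
    have hcd : c + d = t := (hgood c d h2).1
    have hcases : (a = c ∧ b = d) ∨ (a = d ∧ b = c) := by
      rw [min_def, min_def] at hmin
      split_ifs at hmin <;> omega
    rcases hcases with ⟨he1, he2⟩ | ⟨he1, he2⟩
    · rw [Prod.mk.injEq]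
      exact ⟨he1, he2⟩
    · by_cases hab2 : a = b
      · rw [Prod.mk.injEq]
        exact ⟨hab2.trans he2, hab2.symm.trans he1⟩
      · exfalso
        rw [← he2, ← he1] at h2
        exact hone a b hab2 h1 h2
  have hMnd : (st.2.map (fun ab => min ab.1 ab.2)).Nodup := List.Nodup.map_on hinj hnd
  have hMmem : ∀ m, m ∈ st.2.map (fun ab => min ab.1 ab.2) ↔ (m ∈ sp ∧ QB sp t m) := by
    intro m
    constructor
    · intro hm
      obtain ⟨⟨a, b⟩, hmem, hab⟩ := List.mem_map.1 hm
      simp only at hab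
      obtain ⟨hsum, hasp, hbsp, hcnt⟩ := hgood a b hmem
      have hmax : t - m = max a b := by
        have := min_add_max a b
        omega
      have hmsp : m ∈ sp := by
        rcases min_choice a b with h' | h' <;> rw [← hab, h'] <;> assumption
      have htmsp : t - m ∈ sp := by
        rcases max_choice a b with h' | h' <;> rw [hmax, h'] <;> assumption
      refine ⟨hmsp, ⟨⟨by omega, hmsp, htmsp, fun hmm => ?_⟩, ?_⟩⟩
      · have habq : a = b := by omega
        have : m = a := by omega
        rw [this]
        exact hcnt habq
      · have := min_le_max (a := a) (b := b)
        omega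
    · rintro ⟨hmsp, hQ, hle⟩
      rcases hcomp m (t - m) hQ with h' | h'
      · exact List.mem_map.2 ⟨(m, t - m), h', by simp; omega⟩
      · exact List.mem_map.2 ⟨(t - m, m), h', by simp; omega⟩
  have hFnd : ((PySem.Set.ofList sp).filter (fun v => decide (QB sp t v))).Nodup :=
    (PySem.Set.nodup_ofList sp).filter _
  have hFmem : ∀ m, m ∈ (PySem.Set.ofList sp).filter (fun v => decide (QB sp t v)) ↔
      (m ∈ sp ∧ QB sp t m) := by
    intro m
    rw [List.mem_filter, PySem.Set.mem_ofList, decide_eq_true_eq]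
  have hfin : (st.2.map (fun ab => min ab.1 ab.2)).toFinset =
      ((PySem.Set.ofList sp).filter (fun v => decide (QB sp t v))).toFinset := by
    apply Finset.ext
    intro m
    rw [List.mem_toFinset, List.mem_toFinset, hMmem, hFmem]
  calc st.2.length
      = (st.2.map (fun ab => min ab.1 ab.2)).length := (List.length_map ..).symm
    _ = (st.2.map (fun ab => min ab.1 ab.2)).toFinset.card :=
        (List.toFinset_card_of_nodup hMnd).symm
    _ = ((PySem.Set.ofList sp).filter (fun v => decide (QB sp t v))).toFinset.card := by
        rw [hfin]
    _ = ((PySem.Set.ofList sp).filter (fun v => decide (QB sp t v))).length :=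
        List.toFinset_card_of_nodup hFnd
    _ = (PySem.Set.ofList sp).countP (fun v => decide (QB sp t v)) :=
        List.countP_eq_length_filter.symm

-- B side: the counter really counts, and its keys are the distinct values
lemma counts_getD (sp : List Int) (d : PySem.Dict Int Int) (v : Int) :
    (sp.foldl (fun (d : PySem.Dict Int Int) p => d.insert p (d.getD p 0 + 1)) d).getD v 0
      = d.getD v 0 + sp.count v := by
  induction sp generalizing d with
  | nil => simp
  | cons x xs ih =>
    rw [List.foldl_cons, ih, PySem.Dict.getD_insert, List.count_cons]
    by_cases hv : v = x
    · subst hv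
      simp
      ring
    · simp [hv, Ne.symm hv]

lemma counts_keys (sp : List Int) :
    (sp.foldl (fun (d : PySem.Dict Int Int) p => d.insert p (d.getD p 0 + 1))
      PySem.Dict.empty).keys = PySem.Set.ofList sp := by
  rw [PySem.Dict.keys_foldl_insert]
  rfl

lemma alt_eq_countP (sp : List Int) (t : Int) :
    stockPairs_alt sp t = ((PySem.Set.ofList sp).countP (fun v => decide (QB sp t v)) : Int) := by
  unfold stockPairs_alt
  simp only
  have hkeys : (List.foldl (fun (d : PySem.Dict Int Int) p => d.insert p (d.getD p 0 + 1))
      PySem.Dict.empty sp).keys = PySem.Set.ofList sp := counts_keys sp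
  refine Eq.trans (PySem.List.foldl_congr_mem _ _
    (fun total v => if QB sp t v then total + 1 else total) 0 ?_) ?_
  · intro total v hv
    rw [hkeys, PySem.Set.mem_ofList] at hv
    have hgd : (List.foldl (fun (d : PySem.Dict Int Int) p => d.insert p (d.getD p 0 + 1))
        PySem.Dict.empty sp).getD v 0 = (sp.count v : Int) := by
      rw [counts_getD]
      simp
    have hcont : ∀ w : Int, (List.foldl (fun (d : PySem.Dict Int Int) p =>
        d.insert p (d.getD p 0 + 1)) PySem.Dict.empty sp).contains w = true ↔ w ∈ sp := by
      intro w
      rw [PySem.Dict.contains_iff_mem_keys, hkeys, PySem.Set.mem_ofList]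
    simp only
    by_cases hveq : v = t - v
    · rw [if_pos hveq, hgd]
      have hiff : (2 ≤ (sp.count v : Int)) ↔ QB sp t v := by
        constructor
        · intro h2
          exact ⟨⟨by omega, hv, hveq ▸ hv, fun _ => by exact_mod_cast h2⟩, le_of_eq hveq⟩
        · rintro ⟨⟨_, _, _, hcnt⟩, _⟩
          exact_mod_cast hcnt hveq
      by_cases hq : QB sp t v
      · rw [if_pos (hiff.2 hq), if_pos hq]
      · rw [if_neg (fun h => hq (hiff.1 h)), if_neg hq]
    · rw [if_neg hveq]
      have hiff : ((List.foldl (fun (d : PySem.Dict Int Int) p =>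
          d.insert p (d.getD p 0 + 1)) PySem.Dict.empty sp).contains (t - v) = true ∧ v < t - v)
          ↔ QB sp t v := by
        rw [hcont]
        constructor
        · rintro ⟨hmem, hlt⟩
          exact ⟨⟨by omega, hv, hmem, fun h => absurd h hveq⟩, le_of_lt hlt⟩
        · rintro ⟨⟨_, _, hmem, _⟩, hle⟩
          exact ⟨hmem, lt_of_le_of_ne hle hveq⟩
      by_cases hq : QB sp t v
      · rw [if_pos (hiff.2 hq), if_pos hq]
      · rw [if_neg (fun h => hq (hiff.1 h)), if_neg hq]
  · rw [PySem.List.foldl_ite_add_one, hkeys, zero_add]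

-- ===== VERDICT (by name: the statement is the Claim_ definition above) =====
theorem stockPairs_spec : Claim_equal_stockPairs := by
  intro sp t _
  unfold Spec_stockPairs
  rw [alt_eq_countP]
  unfold stockPairs
  simp only
  rw [← pairs_length t sp (inv_fold t sp)]
  rfl
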